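-- pv_equiv track=rewrite | github.com/yeastgenome/PatmatchDocker | www/app/fasta_utils.py | get_name_offset
-- ===== SOURCE A (Python) =====
-- from typing import Iterator, Tuple, Dict, List, Optional
--
-- def get_name_offset(offset: int, record_offset_list: List[int]) -> int:
--     """
--     Perform binary search to find the sequence name offset for a given byte position.
--
--     Args:
--         offset: The byte offset to look up
--         record_offset_list: Sorted list of record offsets
--
--     Returns:
--         The sequence start offset for the given position
--     """
--     if not record_offset_list:
--         return 0
--
--     low = 0
--     high = len(record_offset_list) - 1
--
--     while high > low:
--         middle = (low + high) // 2
--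
--         if record_offset_list[middle] == offset:
--             return offset
--         elif high - low == 1:
--             if offset >= record_offset_list[high]:
--                 return record_offset_list[high]
--             else:
--                 return record_offset_list[low]
--         elif record_offset_list[middle] < offset:
--             low = middle
--         else:  # record_offset_list[middle] > offset
--             high = middle - 1
--
--     return record_offset_list[low]
-- ===== SOURCE B (Python) =====
-- def get_name_offset(offset, record_offset_list):
--     """Iterative version working on a shrinking window (list slices) instead
--     of low/high indices; the probe sits at (len(window)-1)//2."""
--     if not record_offset_list:
--         return 0
--     window = record_offset_list
--     while len(window) > 1:
--         mid = (len(window) - 1) // 2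
--         if window[mid] == offset:
--             return offset
--         if len(window) == 2:
--             return window[1] if offset >= window[1] else window[0]
--         if window[mid] < offset:
--             window = window[mid:]
--         else:
--             window = window[:mid]
--     return window[0]
-- ===== Notes on version B (the rewrite author's own statement) =====
-- stated objective: alternative
-- what changed: Replaces A's low/high index bookkeeping with an iteration on a shrinking window of the list itself (slices window[mid:] / window[:mid], probe at (len(window)-1)//2), which is possible because A's midpoint is always at a fixed relative position in the current window.
import Mathlib
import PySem

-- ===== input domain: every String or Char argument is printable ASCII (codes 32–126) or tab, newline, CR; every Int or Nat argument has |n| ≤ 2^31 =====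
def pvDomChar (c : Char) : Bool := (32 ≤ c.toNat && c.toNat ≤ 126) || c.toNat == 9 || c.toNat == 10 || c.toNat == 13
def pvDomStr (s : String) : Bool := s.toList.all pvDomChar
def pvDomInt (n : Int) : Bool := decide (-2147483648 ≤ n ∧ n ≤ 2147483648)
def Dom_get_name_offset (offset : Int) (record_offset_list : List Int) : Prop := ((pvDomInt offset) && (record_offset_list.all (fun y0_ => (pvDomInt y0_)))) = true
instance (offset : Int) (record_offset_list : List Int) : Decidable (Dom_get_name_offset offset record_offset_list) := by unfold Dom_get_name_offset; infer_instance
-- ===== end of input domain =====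

-- B replaces A's low/high index bookkeeping by an iteration on a shrinking window (list slices),
-- probing at (len(window)-1)//2 (objective: alternative decomposition, same cost).

-- ===== PORT A =====
-- record_offset_list[i]; every index A reaches is in range, so the default is never returned
def pvGet (l : List Int) (i : Int) : Int := (PySem.List.pyGet? l i).getD 0

-- the while-loop of A, as recursion over the loop state (low, high)
def pvALoop (offset : Int) (l : List Int) (low high : Int) : Int :=
  if _h : high > low then
    -- middle = (low + high) // 2 (inlined at each use)
    if pvGet l (PySem.Int.floordiv (low + high) 2) = offset then offset
    else if high - low = 1 then
      if offset ≥ pvGet l high then pvGet l high else pvGet l low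
    else if pvGet l (PySem.Int.floordiv (low + high) 2) < offset then
      pvALoop offset l (PySem.Int.floordiv (low + high) 2) high
    else pvALoop offset l low (PySem.Int.floordiv (low + high) 2 - 1)
  else pvGet l low
termination_by (high - low).toNat
decreasing_by
  · have := PySem.Int.floordiv_two_mid_bounds (le_of_lt _h)
    have h2 : PySem.Int.floordiv (low + high) 2 = (low + high) / 2 :=
      PySem.Int.floordiv_eq_ediv_of_pos (by norm_num)
    omega
  · have := PySem.Int.floordiv_two_mid_bounds (le_of_lt _h)
    have h2 : PySem.Int.floordiv (low + high) 2 = (low + high) / 2 :=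
      PySem.Int.floordiv_eq_ediv_of_pos (by norm_num)
    omega

def get_name_offset (offset : Int) (record_offset_list : List Int) : Int :=
  if record_offset_list = [] then 0
  else pvALoop offset record_offset_list 0 ((record_offset_list.length : Int) - 1)

-- ===== PORT B =====
-- B's while-loop over the window; the guard 'w.length ≤ 1' also covers the empty
-- window (never reached from the entry point) so the recursion is total.
-- window[k] for the in-range nonnegative indices B uses is List.getD; window[mid:] / window[:mid]
-- for 0 ≤ mid < len are List.drop / List.take (exact there).
def pvBWindow (offset : Int) (w : List Int) : Int :=
  if w.length ≤ 1 then w.getD 0 0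
  else
    -- mid = (len(window) - 1) // 2 (inlined at each use; len ≥ 2 here, and
    -- Nat division = Python's // on naturals)
    if w.getD ((w.length - 1) / 2) 0 = offset then offset
    else if w.length = 2 then
      if offset ≥ w.getD 1 0 then w.getD 1 0 else w.getD 0 0
    else if w.getD ((w.length - 1) / 2) 0 < offset then pvBWindow offset (w.drop ((w.length - 1) / 2))
    else pvBWindow offset (w.take ((w.length - 1) / 2))
termination_by w.length
decreasing_by
  · simp [List.length_drop]; omega
  · simp [List.length_take]; omega

def get_name_offset_alt (offset : Int) (record_offset_list : List Int) : Int :=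
  if record_offset_list = [] then 0
  else pvBWindow offset record_offset_list

-- ===== PRECONDITION & SPEC =====
def Spec_get_name_offset (offset : Int) (record_offset_list : List Int) (out : Int) : Prop := out = get_name_offset_alt offset record_offset_list
instance (offset : Int) (record_offset_list : List Int) (out : Int) : Decidable (Spec_get_name_offset offset record_offset_list out) := by unfold Spec_get_name_offset; infer_instance

-- ===== CLAIM (what is proved, stated in full; the proofs are below) =====
def Claim_equal_get_name_offset : Prop := ∀ (offset : Int) (record_offset_list : List Int), Dom_get_name_offset offset record_offset_list → Spec_get_name_offset offset record_offset_list (get_name_offset offset record_offset_list)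

-- ===== LEMMAS AND PROOFS =====

-- the window l[low..high] as drop-then-take
def pvWin (l : List Int) (low high : Int) : List Int :=
  (l.drop low.toNat).take (high - low + 1).toNat

theorem pvWin_length (l : List Int) (low high : Int) (h0 : 0 ≤ low) (_h1 : low ≤ high)
    (h2 : high < (l.length : Int)) : (pvWin l low high).length = (high - low + 1).toNat := by
  simp [pvWin, List.length_take, List.length_drop]
  omega

theorem pvWin_get (l : List Int) (low high : Int) (k : Nat) (h0 : 0 ≤ low)
    (hk : (k : Int) ≤ high - low) (h2 : high < (l.length : Int)) :
    (pvWin l low high).getD k 0 = pvGet l (low + k) := by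
  have hin : low.toNat + k < l.length := by omega
  have hgd : (pvWin l low high).getD k 0 = l.getD (low.toNat + k) 0 := by
    simp [pvWin, List.getD, List.getElem?_drop, show k < (high - low + 1).toNat by omega]
  rw [hgd, pvGet, show low + (k : Int) = ((low.toNat + k : Nat) : Int) by omega,
    PySem.List.pyGet?_natCast]
  simp [List.getD]

theorem pvALoop_eq_window (offset : Int) (l : List Int) (low high : Int)
    (h0 : 0 ≤ low) (h1 : low ≤ high) (h2 : high < (l.length : Int)) :
    pvALoop offset l low high = pvBWindow offset (pvWin l low high) := by
  fun_induction pvALoop offset l low high with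
  | case1 lo hi h hm =>
    have hlen := pvWin_length l lo hi h0 (le_of_lt h) h2
    have hmid : PySem.Int.floordiv (lo + hi) 2 = lo + ((((hi - lo + 1).toNat - 1) / 2 : Nat) : Int) := by
      rw [PySem.Int.floordiv_eq_ediv_of_pos (by norm_num : (0:Int) < 2)]; omega
    rw [hmid] at hm
    have gm := pvWin_get l lo hi (((hi - lo + 1).toNat - 1) / 2) h0 (by omega) h2
    rw [pvBWindow, hlen, if_neg (by omega : ¬ (hi - lo + 1).toNat ≤ 1),
      if_pos (by rw [gm]; exact hm)]
  | case2 lo hi h hm h1' hge =>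
    have he : hi = lo + 1 := by omega
    have hlen := pvWin_length l lo hi h0 (le_of_lt h) h2
    have hmid : PySem.Int.floordiv (lo + hi) 2 = lo + ((((hi - lo + 1).toNat - 1) / 2 : Nat) : Int) := by
      rw [PySem.Int.floordiv_eq_ediv_of_pos (by norm_num : (0:Int) < 2)]; omega
    rw [hmid] at hm
    have gm := pvWin_get l lo hi (((hi - lo + 1).toNat - 1) / 2) h0 (by omega) h2
    have g1 := pvWin_get l lo hi 1 h0 (by omega) h2
    rw [pvBWindow, hlen, if_neg (by omega : ¬ (hi - lo + 1).toNat ≤ 1),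
      if_neg (by rw [gm]; exact hm), if_pos (by omega : (hi - lo + 1).toNat = 2),
      if_pos (by rw [g1]; exact_mod_cast he ▸ hge)]
    rw [g1]; norm_num [he]
  | case3 lo hi h hm h1' hnge =>
    have he : hi = lo + 1 := by omega
    have hlen := pvWin_length l lo hi h0 (le_of_lt h) h2
    have hmid : PySem.Int.floordiv (lo + hi) 2 = lo + ((((hi - lo + 1).toNat - 1) / 2 : Nat) : Int) := by
      rw [PySem.Int.floordiv_eq_ediv_of_pos (by norm_num : (0:Int) < 2)]; omega
    rw [hmid] at hm
    have gm := pvWin_get l lo hi (((hi - lo + 1).toNat - 1) / 2) h0 (by omega) h2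
    have g0 := pvWin_get l lo hi 0 h0 (by omega) h2
    have g1 := pvWin_get l lo hi 1 h0 (by omega) h2
    rw [pvBWindow, hlen, if_neg (by omega : ¬ (hi - lo + 1).toNat ≤ 1),
      if_neg (by rw [gm]; exact hm), if_pos (by omega : (hi - lo + 1).toNat = 2),
      if_neg (by rw [g1]; exact_mod_cast he ▸ hnge)]
    rw [g0]; norm_num
  | case4 lo hi h hm h1' hlt ih =>
    have hlen := pvWin_length l lo hi h0 (le_of_lt h) h2
    have hmid : PySem.Int.floordiv (lo + hi) 2 = lo + ((((hi - lo + 1).toNat - 1) / 2 : Nat) : Int) := by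
      rw [PySem.Int.floordiv_eq_ediv_of_pos (by norm_num : (0:Int) < 2)]; omega
    rw [hmid] at hm hlt ih ⊢
    have gm := pvWin_get l lo hi (((hi - lo + 1).toNat - 1) / 2) h0 (by omega) h2
    have hdrop : (pvWin l lo hi).drop (((hi - lo + 1).toNat - 1) / 2) =
        pvWin l (lo + ((((hi - lo + 1).toNat - 1) / 2 : Nat) : Int)) hi := by
      unfold pvWin
      rw [List.drop_take, List.drop_drop]
      congr 1
      · omega
      · congr 1
        omega
    rw [pvBWindow, hlen, if_neg (by omega : ¬ (hi - lo + 1).toNat ≤ 1),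
      if_neg (by rw [gm]; exact hm), if_neg (by omega : ¬ (hi - lo + 1).toNat = 2),
      if_pos (by rw [gm]; exact hlt), hdrop]
    exact ih (by omega) (by omega) h2
  | case5 lo hi h hm h1' hnlt ih =>
    have hlen := pvWin_length l lo hi h0 (le_of_lt h) h2
    have hmid : PySem.Int.floordiv (lo + hi) 2 = lo + ((((hi - lo + 1).toNat - 1) / 2 : Nat) : Int) := by
      rw [PySem.Int.floordiv_eq_ediv_of_pos (by norm_num : (0:Int) < 2)]; omega
    rw [hmid] at hm hnlt ih ⊢
    have gm := pvWin_get l lo hi (((hi - lo + 1).toNat - 1) / 2) h0 (by omega) h2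
    have htake : (pvWin l lo hi).take (((hi - lo + 1).toNat - 1) / 2) =
        pvWin l lo (lo + ((((hi - lo + 1).toNat - 1) / 2 : Nat) : Int) - 1) := by
      unfold pvWin
      rw [List.take_take]
      congr 1
      omega
    rw [pvBWindow, hlen, if_neg (by omega : ¬ (hi - lo + 1).toNat ≤ 1),
      if_neg (by rw [gm]; exact hm), if_neg (by omega : ¬ (hi - lo + 1).toNat = 2),
      if_neg (by rw [gm]; exact hnlt), htake]
    exact ih h0 (by omega) (by omega)
  | case6 lo hi h =>
    have hlen := pvWin_length l lo hi h0 h1 h2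
    have g0 := pvWin_get l lo hi 0 h0 (by omega) h2
    rw [pvBWindow, hlen, if_pos (by omega : (hi - lo + 1).toNat ≤ 1), g0]
    norm_num

-- ===== VERDICT (by name: the statement is the Claim_ definition above) =====
theorem get_name_offset_spec : Claim_equal_get_name_offset := by
  intro offset l _
  unfold Spec_get_name_offset get_name_offset get_name_offset_alt
  split
  · rfl
  · rename_i hne
    have hlen : 1 ≤ l.length := by
      cases l with
      | nil => exact absurd rfl hne
      | cons a t => simp
    rw [pvALoop_eq_window offset l 0 ((l.length : Int) - 1) le_rfl (by omega) (by omega)]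
    congr 1
    simp [pvWin]
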